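-- pv_equiv track=rewrite | github.com/rubelw/OSSS | src/OSSS/ai/agents/query_data/handlers/library_checkouts_handler.py | _select_library_checkouts_fields
-- ===== SOURCE A (Python) =====
-- from typing import Any, Dict, List, Sequence
--
-- def _select_library_checkouts_fields(
--     rows: Sequence[Dict[str, Any]],
-- ) -> List[str]:
--     if not rows:
--         return []
--
--     preferred_order = [
--         "id",
--         "checkout_code",
--         "item_id",
--         "item_code",
--         "item_title",
--         "patron_id",
--         "patron_code",
--         "patron_name",
--         "checkout_date",
--         "due_date",
--         "return_date",
--         "status",
--         "renewed_count",
--         "created_at",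
--         "updated_at",
--     ]
--
--     all_keys: List[str] = []
--     for r in rows:
--         for k in r:
--             if k not in all_keys:
--                 all_keys.append(k)
--
--     ordered = [k for k in preferred_order if k in all_keys]
--     ordered.extend(k for k in all_keys if k not in ordered)
--     return ordered
-- ===== SOURCE B (Python) =====
-- from typing import Any, Dict, List, Sequence
--
-- def _select_library_checkouts_fields(
--     rows: Sequence[Dict[str, Any]],
-- ) -> List[str]:
--     if not rows:
--         return []
--
--     preferred_order = [
--         "id",
--         "checkout_code",
--         "item_id",
--         "item_code",
--         "item_title",
--         "patron_id",
--         "patron_code",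
--         "patron_name",
--         "checkout_date",
--         "due_date",
--         "return_date",
--         "status",
--         "renewed_count",
--         "created_at",
--         "updated_at",
--     ]
--     sentinel = len(preferred_order)
--
--     # distinct keys in first-seen order, deduped in one pass
--     keys = list(dict.fromkeys(k for r in rows for k in r))
--
--     def rank(k: str) -> int:
--         return preferred_order.index(k) if k in preferred_order else sentinel
--
--     # stable sort: preferred keys first (in preferred order), then the rest
--     # in first-seen order
--     return sorted(keys, key=rank)
-- ===== Notes on version B (the rewrite author's own statement) =====
-- stated objective: faster
-- what changed: B dedups all keys in one pass with dict.fromkeys and orders them with a single stable sort keyed by preferred-order rank, replacing A's append-with-linear-list-membership dedup loop and its filter-plus-membership-guarded extend.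
import Mathlib
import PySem

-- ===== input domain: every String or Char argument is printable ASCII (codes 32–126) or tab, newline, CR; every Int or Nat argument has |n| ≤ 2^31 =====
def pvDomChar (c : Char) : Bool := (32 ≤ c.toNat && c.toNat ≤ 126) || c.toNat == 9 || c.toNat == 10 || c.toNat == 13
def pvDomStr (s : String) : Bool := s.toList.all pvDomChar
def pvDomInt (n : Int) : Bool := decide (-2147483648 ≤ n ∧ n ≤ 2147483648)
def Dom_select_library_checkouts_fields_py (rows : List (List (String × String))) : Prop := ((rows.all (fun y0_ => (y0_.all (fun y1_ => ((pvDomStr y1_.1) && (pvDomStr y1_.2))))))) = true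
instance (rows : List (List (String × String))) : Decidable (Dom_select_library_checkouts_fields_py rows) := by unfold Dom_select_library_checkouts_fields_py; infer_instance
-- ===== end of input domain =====

-- B replaces A's linear-list-membership dedup loop plus preferred-filter-and-extend
-- by a one-pass hash dedup followed by a single stable sort keyed by preferred rank
-- (measurably faster: A's dedup is quadratic in the number of distinct keys).

def pvPreferredOrder : List String :=
  ["id", "checkout_code", "item_id", "item_code", "item_title",
   "patron_id", "patron_code", "patron_name", "checkout_date", "due_date",
   "return_date", "status", "renewed_count", "created_at", "updated_at"]

-- ===== PORT A =====
def select_library_checkouts_fields_py (rows : List (List (String × String))) : List String :=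
  if rows.isEmpty then [] else
  let preferred_order := pvPreferredOrder
  let all_keys : List String :=
    rows.foldl (fun acc r =>
      r.foldl (fun acc kv => if kv.1 ∈ acc then acc else acc ++ [kv.1]) acc) []
  let ordered := preferred_order.filter (fun k => decide (k ∈ all_keys))
  -- ordered.extend(...): CPython appends one by one while the generator tests
  -- membership against the growing list, hence the fold over `ordered` itself.
  all_keys.foldl (fun acc k => if k ∈ acc then acc else acc ++ [k]) ordered

-- ===== PORT B =====
def select_library_checkouts_fields_py_alt (rows : List (List (String × String))) : List String :=
  if rows.isEmpty then [] else
  let preferred_order := pvPreferredOrder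
  let sentinel : Nat := preferred_order.length
  let keys := PySem.List.dedup (rows.flatMap (fun r => r.map Prod.fst))
  PySem.List.sorted keys (fun k => (PySem.List.index? preferred_order k).getD sentinel) false

-- ===== PRECONDITION & SPEC =====
def Spec_select_library_checkouts_fields_py (rows : List (List (String × String))) (out : List String) : Prop := out = select_library_checkouts_fields_py_alt rows
instance (rows : List (List (String × String))) (out : List String) : Decidable (Spec_select_library_checkouts_fields_py rows out) := by unfold Spec_select_library_checkouts_fields_py; infer_instance

-- ===== CLAIM (what is proved, stated in full; the proofs are below) =====
def Claim_equal_select_library_checkouts_fields_py : Prop := ∀ (rows : List (List (String × String))), Dom_select_library_checkouts_fields_py rows → Spec_select_library_checkouts_fields_py rows (select_library_checkouts_fields_py rows)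

-- ===== LEMMAS AND PROOFS =====

-- insertBy skips a prefix it must not go before
theorem pv_insertBy_append {α : Type} (before : α → α → Bool) (x : α) (L1 L2 : List α)
    (h : ∀ y ∈ L1, before x y = false) :
    PySem.List.insertBy before x (L1 ++ L2) = L1 ++ PySem.List.insertBy before x L2 := by
  induction L1 with
  | nil => simp
  | cons a t ih =>
    have ha : before x a = false := h a (by simp)
    simp [PySem.List.insertBy, ha, ih (fun y hy => h y (by simp [hy]))]

theorem pv_insertBy_front {α : Type} (before : α → α → Bool) (x : α) (L : List α)
    (h : ∀ y ∈ L, before x y = true) :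
    PySem.List.insertBy before x L = x :: L := by
  cases L with
  | nil => simp [PySem.List.insertBy]
  | cons a t => simp [PySem.List.insertBy, h a (by simp)]

-- stability: a stable sort on a Nat key is the concatenation of the key buckets
theorem pv_sorted_buckets {α : Type} (key : α → Nat) (m : Nat) (xs : List α)
    (h : ∀ x ∈ xs, key x < m) :
    PySem.List.sorted xs key false
      = (List.range m).flatMap (fun j => xs.filter (fun x => decide (key x = j))) := by
  induction xs using List.reverseRecOn with
  | nil => simp [PySem.List.sorted]
  | append_singleton xs x ih =>
    have hx : key x < m := h x (by simp)
    have hxs : ∀ y ∈ xs, key y < m := fun y hy => h y (by simp [hy])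
    have hs : PySem.List.sorted (xs ++ [x]) key false
        = PySem.List.insertBy (fun a b => decide (key a < key b)) x (PySem.List.sorted xs key false) := by
      simp [PySem.List.sorted]
    rw [hs, ih hxs]
    -- split range m at key x + 1
    have hsplit : List.range m
        = List.range (key x + 1) ++ List.range' (key x + 1) (m - (key x + 1)) := by
      rw [List.range_eq_range', List.range_eq_range']
      rw [show m = (key x + 1) + (m - (key x + 1)) by omega, ← List.range'_append]
      norm_num
    rw [hsplit]
    rw [List.flatMap_append, List.flatMap_append]
    rw [pv_insertBy_append]
    · -- front part
      have hfront : (List.range (key x + 1)).flatMap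
            (fun j => (xs ++ [x]).filter (fun y => decide (key y = j)))
          = (List.range (key x)).flatMap (fun j => xs.filter (fun y => decide (key y = j)))
            ++ (xs.filter (fun y => decide (key y = key x)) ++ [x]) := by
        rw [List.range_succ, List.flatMap_append]
        simp only [List.flatMap_singleton]
        congr 1
        · refine List.flatMap_congr (fun j hj => ?_)
          have hjlt : j < key x := List.mem_range.mp hj
          rw [List.filter_append]
          have : [x].filter (fun y => decide (key y = j)) = [] := by
            simp [Nat.ne_of_gt hjlt]
          simp [this]
        · rw [List.filter_append]; simp
      have hback : (List.range' (key x + 1) (m - (key x + 1))).flatMap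
            (fun j => (xs ++ [x]).filter (fun y => decide (key y = j)))
          = (List.range' (key x + 1) (m - (key x + 1))).flatMap
            (fun j => xs.filter (fun y => decide (key y = j))) := by
        refine List.flatMap_congr (fun j hj => ?_)
        have hjgt : key x < j := by
          have := (List.mem_range'_1.mp hj).1; omega
        rw [List.filter_append]
        have : [x].filter (fun y => decide (key y = j)) = [] := by
          simp [Nat.ne_of_lt hjgt]
        simp [this]
      rw [hfront, hback, pv_insertBy_front]
      · rw [List.range_succ, List.flatMap_append]
        simp only [List.flatMap_singleton]
        simp [List.append_assoc]
      · intro y hy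
        simp only [List.mem_flatMap, List.mem_filter, List.mem_range'_1] at hy
        obtain ⟨j, hj, _, hkey⟩ := hy
        have : key y = j := by simpa using hkey
        simp; omega
    · intro y hy
      simp only [List.mem_flatMap, List.mem_filter, List.mem_range] at hy
      obtain ⟨j, hj, _, hkey⟩ := hy
      have : key y = j := by simpa using hkey
      simp; omega

-- the membership-guarded extend: with fresh nodup keys whose membership in the
-- accumulator is decided by p, the fold appends exactly the non-p keys
theorem pv_extend_fold (keys acc0 : List String) (p : String → Prop) [DecidablePred p]
    (hnd : keys.Nodup) (hmem : ∀ k ∈ keys, k ∈ acc0 ↔ p k) :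
    keys.foldl (fun acc k => if k ∈ acc then acc else acc ++ [k]) acc0
      = acc0 ++ keys.filter (fun k => decide (¬ p k)) := by
  induction keys generalizing acc0 with
  | nil => simp
  | cons a t ih =>
    have hna : a ∉ t := by simp at hnd; exact hnd.1
    have hndt : t.Nodup := by simp at hnd; exact hnd.2
    by_cases hpa : p a
    · have : a ∈ acc0 := (hmem a (by simp)).mpr hpa
      simp only [List.foldl_cons, if_pos this]
      rw [ih acc0 hndt (fun k hk => hmem k (by simp [hk]))]
      simp [hpa]
    · have : a ∉ acc0 := fun h => hpa ((hmem a (by simp)).mp h)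
      simp only [List.foldl_cons, if_neg this]
      rw [ih (acc0 ++ [a]) hndt ?_]
      · simp [hpa, List.append_assoc]
      · intro k hk
        constructor
        · intro h
          rcases List.mem_append.mp h with h | h
          · exact (hmem k (by simp [hk])).mp h
          · exact absurd ((List.mem_singleton.mp h) ▸ hk) hna
        · intro h; exact List.mem_append.mpr (Or.inl ((hmem k (by simp [hk])).mpr h))

-- filter for a single value on a nodup list
theorem pv_filter_single (l : List String) (v : String) (hnd : l.Nodup) :
    l.filter (fun k => decide (k = v)) = if v ∈ l then [v] else [] := by
  induction l with
  | nil => simp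
  | cons a t ih =>
    simp only [List.nodup_cons] at hnd
    by_cases hav : a = v
    · subst hav
      have : t.filter (fun k => decide (k = a)) = [] := by
        rw [List.filter_eq_nil_iff]
        intro k hk
        simp only [decide_eq_true_eq]
        intro h; exact hnd.1 (h ▸ hk)
      simp [this]
    · rw [List.filter_cons]
      simp only [decide_eq_true_eq, if_neg hav]
      rw [ih hnd.2]
      by_cases hvt : v ∈ t <;> simp [hvt, Ne.symm hav]

-- rank characterisation
theorem pv_rank_eq_iff (pref : List String) (hnd : pref.Nodup) (k : String) (j : Nat)
    (hj : j < pref.length) :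
    (PySem.List.index? pref k).getD pref.length = j ↔ k = pref[j] := by
  constructor
  · intro h
    cases hidx : PySem.List.index? pref k with
    | none => rw [hidx] at h; simp at h; omega
    | some i =>
      rw [hidx] at h; simp at h; subst h
      obtain ⟨hi, hk, _⟩ := PySem.List.getElem_of_index?_eq_some hidx
      exact hk.symm
  · intro h; subst h
    have hmem : pref[j] ∈ pref := List.getElem_mem hj
    cases hidx : PySem.List.index? pref pref[j] with
    | none => exact absurd hmem ((PySem.List.index?_eq_none_iff _ _).mp hidx)
    | some i =>
      obtain ⟨hi, hk, hlt⟩ := PySem.List.getElem_of_index?_eq_some hidx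
      simp only [Option.getD_some]
      exact (List.Nodup.getElem_inj_iff hnd).mp hk

theorem pv_rank_sentinel_iff (pref : List String) (k : String) :
    (PySem.List.index? pref k).getD pref.length = pref.length ↔ k ∉ pref := by
  constructor
  · intro h hk
    cases hidx : PySem.List.index? pref k with
    | none => exact absurd hidx (by simp [hk])
    | some i =>
      obtain ⟨hi, _, _⟩ := PySem.List.getElem_of_index?_eq_some hidx
      rw [hidx] at h; simp at h; omega
  · intro hk
    rw [(PySem.List.index?_eq_none_iff _ _).mpr hk]; rfl

-- preferred filter as a flatMap over index buckets
theorem pv_pref_buckets (pref keys : List String) (hp : pref.Nodup) (hk : keys.Nodup) :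
    (List.range pref.length).flatMap
        (fun j => keys.filter (fun k => decide ((PySem.List.index? pref k).getD pref.length = j)))
      = pref.filter (fun k => decide (k ∈ keys)) := by
  have hbucket : ∀ j (hj : j < pref.length),
      keys.filter (fun k => decide ((PySem.List.index? pref k).getD pref.length = j))
        = if pref[j] ∈ keys then [pref[j]] else [] := by
    intro j hj
    rw [← pv_filter_single keys pref[j] hk]
    exact List.filter_congr (fun k _ => by
      simp only [decide_eq_decide]; exact pv_rank_eq_iff pref hp k j hj)
  -- filter as flatMap over indices
  have hfilter : ∀ (l : List String) (q : String → Bool),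
      l.filter q = (List.range l.length).flatMap
        (fun j => if q (l.getD j "") then [l.getD j ""] else []) := by
    intro l q
    induction l with
    | nil => simp
    | cons a t ih =>
      rw [List.length_cons, List.range_succ_eq_map, List.flatMap_cons, List.flatMap_map]
      simp only [List.getD_cons_zero, List.getD_cons_succ]
      rw [List.filter_cons, ih]
      by_cases hqa : q a <;> simp [hqa]
  rw [hfilter pref (fun k => decide (k ∈ keys))]
  refine List.flatMap_congr (fun j hj => ?_)
  have hjlt : j < pref.length := List.mem_range.mp hj
  rw [hbucket j hjlt]
  simp [hjlt]

-- A's nested dedup loop computes dedup of the flattened key list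
theorem pv_dedup_loop (rows : List (List (String × String))) :
    rows.foldl (fun acc r =>
        r.foldl (fun acc kv => if kv.1 ∈ acc then acc else acc ++ [kv.1]) acc) []
      = PySem.List.dedup (rows.flatMap (fun r => r.map Prod.fst)) := by
  have hgen : ∀ (rs : List (List (String × String))) (acc : List String),
      rs.foldl (fun acc r =>
        r.foldl (fun acc kv => if kv.1 ∈ acc then acc else acc ++ [kv.1]) acc) acc
      = (rs.flatMap (fun r => r.map Prod.fst)).foldl
          (fun acc k => if k ∈ acc then acc else acc ++ [k]) acc := by
    intro rs
    induction rs with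
    | nil => simp
    | cons r t ih =>
      intro acc
      rw [List.flatMap_cons, List.foldl_append, List.foldl_cons, ih, List.foldl_map]
  rw [hgen]
  rw [show PySem.List.dedup (rows.flatMap (fun r => r.map Prod.fst))
      = (rows.flatMap (fun r => r.map Prod.fst)).foldl PySem.Set.add [] from by
    simp [PySem.List.dedup_eq_ofList, PySem.Set.ofList_eq_foldl]]
  refine PySem.List.foldl_congr_mem _ _ _ _ (fun acc k _ => ?_)
  simp [PySem.Set.add, PySem.Set.contains]

-- ===== VERDICT (by name: the statement is the Claim_ definition above) =====
theorem select_library_checkouts_fields_py_spec : Claim_equal_select_library_checkouts_fields_py := by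
  intro rows _
  unfold Spec_select_library_checkouts_fields_py
  unfold select_library_checkouts_fields_py select_library_checkouts_fields_py_alt
  by_cases hrows : rows.isEmpty
  · simp [hrows]
  · simp only [hrows, if_false, Bool.false_eq_true]
    set keys := PySem.List.dedup (rows.flatMap (fun r => r.map Prod.fst)) with hkeysdef
    have hknd : keys.Nodup := PySem.List.nodup_dedup _
    have hpnd : pvPreferredOrder.Nodup := by decide
    rw [pv_dedup_loop rows, ← hkeysdef]
    -- B side: stable sort = buckets
    rw [pv_sorted_buckets (fun k => (PySem.List.index? pvPreferredOrder k).getD pvPreferredOrder.length)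
        (pvPreferredOrder.length + 1) keys ?_]
    · -- split off the sentinel bucket
      rw [List.range_succ, List.flatMap_append, List.flatMap_singleton]
      -- A side: the extend fold
      rw [pv_extend_fold keys (pvPreferredOrder.filter (fun k => decide (k ∈ keys)))
          (fun k => k ∈ pvPreferredOrder) hknd ?_]
      · congr 1
        · exact (pv_pref_buckets pvPreferredOrder keys hpnd hknd).symm
        · exact List.filter_congr (fun k _ => by
            simp only [decide_eq_decide]
            exact (pv_rank_sentinel_iff pvPreferredOrder k).symm)
      · intro k hk
        simp [List.mem_filter, hk]
    · intro k _
      cases hidx : PySem.List.index? pvPreferredOrder k with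
      | none => simp only [hidx, Option.getD_none]; omega
      | some i =>
        obtain ⟨hi, _, _⟩ := PySem.List.getElem_of_index?_eq_some hidx
        simp only [hidx, Option.getD_some]; omega
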